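-- pv_equiv track=rewrite | github.com/kunwardeeps/MyLeetCode | src/main/java/com/amazon/SimilarPassword.py | checkPasswords
-- ===== SOURCE A (Python) =====
-- def matchingChar(new_char, old_char):
--     ord_new_char = ord(new_char)
--     ord_old_char = ord(old_char)
--     if ord_new_char == ord_old_char: return True
--     if ord_new_char + 1 == ord_old_char: return True
--     if ord_new_char == ord('z') and ord_old_char == ord('a'): return True
--
-- def checkPasswords(new_pw, old_pw):
--     if len(new_pw) < len(old_pw): return "NO"
--     new_pw_ptr = 0
--     num_match = 0
--     for old_char in old_pw:
--         match_found = False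
--         for i in range(new_pw_ptr, len(new_pw)):
--             new_char = new_pw[i]
--             match_found = matchingChar(new_char, old_char)
--             if match_found:
--                 num_match += 1
--                 new_pw_ptr = i + 1
--                 break
--         if not match_found: return "NO"
--
--     if num_match != len(old_pw): return "NO"
--     return "YES"
-- ===== SOURCE B (Python) =====
-- def matchingChar(new_char, old_char):
--     ord_new_char = ord(new_char)
--     ord_old_char = ord(old_char)
--     if ord_new_char == ord_old_char: return True
--     if ord_new_char + 1 == ord_old_char: return True
--     if ord_new_char == ord('z') and ord_old_char == ord('a'): return True
--
-- def checkPasswords(new_pw, old_pw):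
--     old_idx = 0
--     for ch in new_pw:
--         if old_idx < len(old_pw) and matchingChar(ch, old_pw[old_idx]):
--             old_idx += 1
--     return "YES" if old_idx == len(old_pw) else "NO"
-- ===== Notes on version B (the rewrite author's own statement) =====
-- stated objective: simpler
-- what changed: Replaced the outer loop over old_pw with an inner index scan over new_pw (plus a redundant length guard and match counter) by a single forward pass over new_pw that consumes an index into old_pw, returning YES iff the index reaches len(old_pw).
import Mathlib
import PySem

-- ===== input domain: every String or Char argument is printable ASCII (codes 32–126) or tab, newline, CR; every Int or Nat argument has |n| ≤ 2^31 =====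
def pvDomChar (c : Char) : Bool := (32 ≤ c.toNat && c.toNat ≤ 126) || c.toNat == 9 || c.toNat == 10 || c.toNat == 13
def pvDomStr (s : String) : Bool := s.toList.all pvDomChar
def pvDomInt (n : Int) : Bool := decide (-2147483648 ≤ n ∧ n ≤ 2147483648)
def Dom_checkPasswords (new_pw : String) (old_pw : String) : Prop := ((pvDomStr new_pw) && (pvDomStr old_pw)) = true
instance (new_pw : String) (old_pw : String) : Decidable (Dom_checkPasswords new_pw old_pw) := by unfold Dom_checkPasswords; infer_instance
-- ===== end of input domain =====

-- B replaces A's outer-loop-over-old_pw-with-inner-index-scan by a single forward fold over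
-- new_pw consuming an index into old_pw (objective: simpler decomposition, same cost).

-- ===== PORT A =====
-- matchingChar returns True or (falsy) None in Python; ported as Bool.
def matchingCharA (new_char old_char : Char) : Bool :=
  let ord_new_char := new_char.toNat
  let ord_old_char := old_char.toNat
  if ord_new_char = ord_old_char then true
  else if ord_new_char + 1 = ord_old_char then true
  else if ord_new_char = 'z'.toNat ∧ ord_old_char = 'a'.toNat then true
  else false

-- inner loop: for i in range(new_pw_ptr, len(new_pw)) … break on first match; some i = the break index
def innerA (nl : List Char) (old_char : Char) (i : Nat) : Option Nat :=
  if h : i < nl.length then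
    if matchingCharA nl[i] old_char then some i else innerA nl old_char (i + 1)
  else none
termination_by nl.length - i

-- outer loop over old_pw carrying (new_pw_ptr, num_match); none = the early 'return "NO"'
def outerA (nl : List Char) (ol : List Char) (new_pw_ptr num_match : Nat) : Option Nat :=
  match ol with
  | [] => some num_match
  | old_char :: rest =>
    match innerA nl old_char new_pw_ptr with
    | some i => outerA nl rest (i + 1) (num_match + 1)
    | none => none

def checkPasswords (new_pw : String) (old_pw : String) : String :=
  let nl := new_pw.toList
  let ol := old_pw.toList
  if nl.length < ol.length then "NO"
  else
    match outerA nl ol 0 0 with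
    | none => "NO"
    | some num_match => if num_match ≠ ol.length then "NO" else "YES"

-- ===== PORT B =====
def checkPasswords_alt (new_pw : String) (old_pw : String) : String :=
  let ol := old_pw.toList
  let old_idx := new_pw.toList.foldl
    (fun old_idx ch =>
      match ol[old_idx]? with
      | some oc => if matchingCharA ch oc then old_idx + 1 else old_idx
      | none => old_idx) 0
  if old_idx = ol.length then "YES" else "NO"

-- ===== PRECONDITION & SPEC =====
def Spec_checkPasswords (new_pw : String) (old_pw : String) (out : String) : Prop := out = checkPasswords_alt new_pw old_pw
instance (new_pw : String) (old_pw : String) (out : String) : Decidable (Spec_checkPasswords new_pw old_pw out) := by unfold Spec_checkPasswords; infer_instance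

-- ===== CLAIM (what is proved, stated in full; the proofs are below) =====
def Claim_equal_checkPasswords : Prop := ∀ (new_pw : String) (old_pw : String), Dom_checkPasswords new_pw old_pw → Spec_checkPasswords new_pw old_pw (checkPasswords new_pw old_pw)

-- ===== LEMMAS AND PROOFS =====

-- reference recursion: "old is a fuzzy subsequence of new"
def fsub : List Char → List Char → Bool
  | [], _ => true
  | _ :: _, [] => false
  | oc :: orest, nc :: nrest =>
    if matchingCharA nc oc then fsub orest nrest else fsub (oc :: orest) nrest

-- first match position in a list
def firstM (dl : List Char) (oc : Char) : Option Nat :=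
  match dl with
  | [] => none
  | x :: xs => if matchingCharA x oc then some 0 else (firstM xs oc).map (· + 1)

theorem firstM_lt (dl : List Char) (oc : Char) (j : Nat) (h : firstM dl oc = some j) :
    j < dl.length := by
  induction dl generalizing j with
  | nil => simp [firstM] at h
  | cons x xs ih =>
    simp only [firstM] at h
    split at h
    · simp only [Option.some.injEq] at h
      simp only [List.length_cons]
      omega
    · cases hx : firstM xs oc with
      | none => simp [hx] at h
      | some k =>
        simp [hx] at h
        have := ih k hx
        simp [← h]; omega

theorem innerA_eq (nl : List Char) (oc : Char) (i : Nat) :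
    innerA nl oc i = (firstM (nl.drop i) oc).map (· + i) := by
  by_cases h : i < nl.length
  · rw [innerA]
    have hd : nl.drop i = nl[i] :: nl.drop (i + 1) := List.drop_eq_getElem_cons h
    rw [hd]
    simp only [h, dif_pos, firstM]
    split
    · simp
    · rw [innerA_eq nl oc (i + 1)]
      cases firstM (nl.drop (i + 1)) oc <;> simp <;> omega
  · rw [innerA]
    simp only [h, dif_neg, not_false_iff]
    rw [List.drop_eq_nil_of_le (by omega)]
    simp [firstM]
termination_by nl.length - i

theorem fsub_cons_none (oc : Char) (rest dl : List Char) (h : firstM dl oc = none) :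
    fsub (oc :: rest) dl = false := by
  induction dl with
  | nil => simp [fsub]
  | cons x xs ih =>
    by_cases hm : matchingCharA x oc = true
    · simp [firstM, hm] at h
    · simp [firstM, hm] at h
      simp [fsub, hm, ih h]

theorem fsub_cons_some (oc : Char) (rest dl : List Char) (j : Nat) (h : firstM dl oc = some j) :
    fsub (oc :: rest) dl = fsub rest (dl.drop (j + 1)) := by
  induction dl generalizing j with
  | nil => simp [firstM] at h
  | cons x xs ih =>
    by_cases hm : matchingCharA x oc = true
    · simp [firstM, hm] at h
      subst h
      simp [fsub, hm]
    · simp [firstM, hm] at h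
      obtain ⟨k, hk, rfl⟩ := h
      simp [fsub, hm, ih k hk]

theorem outerA_eq (nl ol : List Char) (ptr num : Nat) (hptr : ptr ≤ nl.length) :
    outerA nl ol ptr num =
      if fsub ol (nl.drop ptr) then some (num + ol.length) else none := by
  induction ol generalizing ptr num with
  | nil => simp [outerA, fsub]
  | cons oc rest ih =>
    simp only [outerA, innerA_eq]
    cases hf : firstM (nl.drop ptr) oc with
    | none => simp [fsub_cons_none oc rest _ hf]
    | some j =>
      have hj := firstM_lt _ _ _ hf
      have hdd : (nl.drop ptr).drop (j + 1) = nl.drop (j + ptr + 1) := by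
        rw [List.drop_drop]; ring_nf
      have hle : j + ptr + 1 ≤ nl.length := by
        rw [List.length_drop] at hj; omega
      simp only [Option.map_some]
      rw [ih (j + ptr + 1) (num + 1) hle, fsub_cons_some oc rest _ j hf, hdd]
      have hnum : num + 1 + rest.length = num + (oc :: rest).length := by
        simp [List.length_cons]; omega
      rw [hnum]

theorem foldB_stuck (nl : List Char) (ol : List Char) :
    nl.foldl (fun old_idx ch =>
      match ol[old_idx]? with
      | some oc => if matchingCharA ch oc then old_idx + 1 else old_idx
      | none => old_idx) ol.length = ol.length := by
  induction nl with
  | nil => rfl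
  | cons c cs ih =>
    simp only [List.foldl_cons]
    rw [List.getElem?_eq_none (by omega)]
    exact ih

theorem foldB_eq (nl ol : List Char) (idx : Nat) (hidx : idx ≤ ol.length) :
    (nl.foldl (fun old_idx ch =>
      match ol[old_idx]? with
      | some oc => if matchingCharA ch oc then old_idx + 1 else old_idx
      | none => old_idx) idx = ol.length) ↔ fsub (ol.drop idx) nl = true := by
  induction nl generalizing idx with
  | nil =>
    simp only [List.foldl_nil]
    constructor
    · intro h; subst h; simp [List.drop_eq_nil_of_le, fsub]
    · intro h
      by_contra hne
      have hlt : idx < ol.length := lt_of_le_of_ne hidx hne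
      have : ol.drop idx = ol[idx] :: ol.drop (idx + 1) := List.drop_eq_getElem_cons hlt
      rw [this] at h; simp [fsub] at h
  | cons nc nrest ih =>
    simp only [List.foldl_cons]
    cases hg : ol[idx]? with
    | none =>
      have hidx' : idx = ol.length := by
        have := List.getElem?_eq_none_iff.mp hg; omega
      subst hidx'
      simp only [hg, List.drop_length, fsub]
      simp [foldB_stuck]
    | some oc =>
      have hlt : idx < ol.length := by
        by_contra hc
        rw [List.getElem?_eq_none (by omega)] at hg
        simp at hg
      have hd : ol.drop idx = ol[idx] :: ol.drop (idx + 1) := List.drop_eq_getElem_cons hlt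
      have hoc : oc = ol[idx] := by
        rw [List.getElem?_eq_getElem hlt] at hg
        exact (Option.some.inj hg).symm
      subst hoc
      simp only [hg, hd, fsub]
      by_cases hm : matchingCharA nc ol[idx] = true
      · simp only [hm, if_pos, if_true]
        exact ih (idx + 1) hlt
      · simp only [hm, if_neg, Bool.false_eq_true, if_false]
        rw [← hd]
        exact ih idx hidx

theorem fsub_length_le (nl ol : List Char) (h : fsub ol nl = true) :
    ol.length ≤ nl.length := by
  induction nl generalizing ol with
  | nil => cases ol with
    | nil => simp
    | cons _ _ => simp [fsub] at h
  | cons nc nrest ih =>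
    cases ol with
    | nil => simp
    | cons oc orest =>
      simp only [fsub] at h
      split at h
      · have := ih orest h; simp; omega
      · have := ih (oc :: orest) h; simp at this ⊢; omega

theorem checkPasswords_eq_alt (new_pw old_pw : String) :
    checkPasswords new_pw old_pw = checkPasswords_alt new_pw old_pw := by
  unfold checkPasswords checkPasswords_alt
  simp only
  set F := List.foldl
    (fun old_idx ch =>
      match old_pw.toList[old_idx]? with
      | some oc => if matchingCharA ch oc then old_idx + 1 else old_idx
      | none => old_idx) 0 new_pw.toList with hF
  have hB := foldB_eq new_pw.toList old_pw.toList 0 (Nat.zero_le _)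
  rw [outerA_eq new_pw.toList old_pw.toList 0 0 (Nat.zero_le _)]
  simp only [List.drop_zero, Nat.zero_add, ← hF] at hB ⊢
  cases h : fsub old_pw.toList new_pw.toList with
  | false =>
    have hne : ¬ (F = old_pw.toList.length) := by rw [hB, h]; simp
    rw [if_neg hne]
    simp [h]
  | true =>
    have heq : F = old_pw.toList.length := hB.mpr h
    have hle := fsub_length_le new_pw.toList old_pw.toList h
    rw [if_pos heq, if_neg (Nat.not_lt.mpr hle)]
    simp [h]

-- ===== VERDICT (by name: the statement is the Claim_ definition above) =====
theorem checkPasswords_spec : Claim_equal_checkPasswords := by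
  intro new_pw old_pw _
  exact checkPasswords_eq_alt new_pw old_pw
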